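-- pv_equiv track=rewrite | github.com/Tanton-scu/CrossDomainTuners | code/systemTuners/BestConfig.py | get_bounded_space
-- ===== SOURCE A (Python) =====
-- def enum_to_numeric(enum_values):
--     """将枚举值映射为连续数值（如["low", "medium", "high"]→[0,1,2]）
--     论文4.1节：枚举参数通过数值映射转为连续范围，确保DDS可划分区间
--     """
--     # 去重并保持原始顺序（避免重复值影响映射一致性）
--     unique_enums = list(dict.fromkeys(enum_values))
--     enum_map = {enum: i for i, enum in enumerate(unique_enums)}
--     numeric_values = [enum_map[enum] for enum in enum_values]
--     return numeric_values, enum_map, unique_enums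
--
-- def get_bounded_space(current_best, independent_set, other_samples, expand_factor=1):
--     """确定RBS有界搜索空间（聚焦当前最优配置周围）
--     论文4.2节：通过左右边界限制搜索范围，平衡局部探索与全局搜索
--     expand_factor：边界扩展系数（用于无改进时扩大搜索范围）
--     """
--     bounded_space = []
--     for p_idx, (current_val, param_values) in enumerate(zip(current_best, independent_set)):
--         _, enum_map, unique_enums = enum_to_numeric(param_values)
--         current_numeric = enum_map[current_val]
--         other_numerics = [enum_map[s[p_idx]] for s in other_samples if s[p_idx] in enum_map]
--         sorted_others = sorted(other_numerics)
--         global_min, global_max = 0, len(unique_enums) - 1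
--
--         # 计算左右边界（论文4.2节定义）
--         left = -float('inf')
--         right = float('inf')
--         for v in sorted_others:
--             if current_numeric > v > left:
--                 left = v  # 左边界：小于当前值的最大值
--             if current_numeric < v < right:
--                 right = v  # 右边界：大于当前值的最小值
--
--         # 边界有效性处理（若无参考样本，使用全局范围）
--         left = left if left != -float('inf') else global_min
--         right = right if right != float('inf') else global_max
--
--         # 边界扩展（论文4.2节递归逻辑：无改进时扩大范围）
--         left = left - (current_numeric - left) * expand_factor if left != global_min else global_min
--         right = right + (right - current_numeric) * expand_factor if right != global_max else global_max
--
--         # 生成边界内的候选值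
--         candidates = [enum for enum in unique_enums if left < enum_map[enum] < right]
--         candidates = candidates if candidates else unique_enums  # 兜底
--         bounded_space.append(candidates)
--     return bounded_space
-- ===== SOURCE B (Python) =====
-- def get_bounded_space(current_best, independent_set, other_samples, expand_factor=1):
--     """Bounded search space per parameter: single linear scan over the samples
--     maintains the max index below and min index above the current value,
--     instead of building an intermediate numeric list and sorting it."""
--     bounded_space = []
--     for p_idx, (current_val, param_values) in enumerate(zip(current_best, independent_set)):
--         unique_enums = list(dict.fromkeys(param_values))
--         enum_map = {e: i for i, e in enumerate(unique_enums)}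
--         cur = enum_map[current_val]
--         n_max = len(unique_enums) - 1
--         below = None  # max mapped sample index strictly below cur
--         above = None  # min mapped sample index strictly above cur
--         for s in other_samples:
--             i = enum_map.get(s[p_idx])
--             if i is None:
--                 continue
--             if i < cur and (below is None or below < i):
--                 below = i
--             elif cur < i and (above is None or i < above):
--                 above = i
--         left = 0 if below is None or below == 0 else below - (cur - below) * expand_factor
--         right = n_max if above is None or above == n_max else above + (above - cur) * expand_factor
--         candidates = [e for k, e in enumerate(unique_enums) if left < k < right]
--         bounded_space.append(candidates if candidates else unique_enums)
--     return bounded_space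
-- ===== Notes on version B (the rewrite author's own statement) =====
-- stated objective: alternative
-- what changed: Replaces A's per-parameter build-a-numeric-list + sort + boundary loop with a single linear scan over the samples that maintains the max mapped index below and the min above the current value, and generates candidates by position via enumerate instead of dict lookups.
import Mathlib
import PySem

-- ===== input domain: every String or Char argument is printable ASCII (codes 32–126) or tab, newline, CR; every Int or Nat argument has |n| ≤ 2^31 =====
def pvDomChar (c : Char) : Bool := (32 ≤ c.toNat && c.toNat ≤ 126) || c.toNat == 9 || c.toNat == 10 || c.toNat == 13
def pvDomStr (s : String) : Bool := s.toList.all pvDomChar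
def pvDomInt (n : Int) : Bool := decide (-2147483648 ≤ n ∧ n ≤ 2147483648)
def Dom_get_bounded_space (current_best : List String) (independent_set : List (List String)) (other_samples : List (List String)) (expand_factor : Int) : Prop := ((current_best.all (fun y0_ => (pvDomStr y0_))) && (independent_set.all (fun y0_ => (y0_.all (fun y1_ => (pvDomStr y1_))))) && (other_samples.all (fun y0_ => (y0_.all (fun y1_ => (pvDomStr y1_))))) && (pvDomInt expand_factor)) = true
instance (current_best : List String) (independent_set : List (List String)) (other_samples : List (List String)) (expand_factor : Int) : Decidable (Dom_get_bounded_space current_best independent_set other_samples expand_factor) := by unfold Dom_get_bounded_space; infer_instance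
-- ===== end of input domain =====

-- B replaces A's build-list + sort + boundary loop by a single linear scan over the samples
-- that maintains the max mapped index below and the min above the current value (objective: alternative).

-- ===== PORT A =====

-- A's helper enum_to_numeric: dedup keeping first occurrences, index map, mapped values
def enum_to_numeric (enum_values : List String) : List Int × PySem.Dict String Int × List String :=
  let unique_enums := PySem.List.dedup enum_values
  let enum_map := (PySem.List.enumerate unique_enums 0).foldl (fun d q => d.insert q.2 q.1) PySem.Dict.empty
  -- enum_map[enum]: the key is always present (enum ∈ unique_enums), so the default is never read
  let numeric_values := enum_values.map (fun e => enum_map.getD e 0)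
  (numeric_values, enum_map, unique_enums)

-- the left/right update of one iteration of A's "for v in sorted_others" loop (None = ±inf sentinel)
def aStepL (cur : Int) (l : Option Int) (v : Int) : Option Int :=
  match l with
  | none => if v < cur then some v else none
  | some lv => if v < cur ∧ lv < v then some v else some lv

def aStepR (cur : Int) (r : Option Int) (v : Int) : Option Int :=
  match r with
  | none => if cur < v then some v else none
  | some rv => if cur < v ∧ v < rv then some v else some rv

def aStep (cur : Int) (lr : Option Int × Option Int) (v : Int) : Option Int × Option Int :=
  (aStepL cur lr.1 v, aStepR cur lr.2 v)

-- [enum_map[s[p_idx]] for s in other_samples if s[p_idx] in enum_map]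
-- (s[p_idx] raising IndexError is excluded by Pre_; the membership test + lookup is get?)
def aOtherNumerics (enum_map : PySem.Dict String Int) (p_idx : Int) (other_samples : List (List String)) : List Int :=
  other_samples.foldl (fun acc s =>
    match PySem.List.pyGet? s p_idx with
    | none => acc
    | some x =>
      match enum_map.get? x with
      | some nv => acc ++ [nv]
      | none => acc) []

-- the body of A's outer loop for one (p_idx, (current_val, param_values))
def aBody (other_samples : List (List String)) (expand_factor : Int) (p : Int × String × List String) : List String :=
  let r := enum_to_numeric p.2.2
  let enum_map := r.2.1
  let unique_enums := r.2.2
  -- enum_map[current_best[p_idx]]: KeyError when absent is excluded by Pre_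
  let current_numeric := enum_map.getD p.2.1 0
  let sorted_others := PySem.List.sorted (aOtherNumerics enum_map p.1 other_samples) (fun v => v) false
  let global_max : Int := (unique_enums.length : Int) - 1
  let lr := sorted_others.foldl (aStep current_numeric) (none, none)
  let left1 : Int := match lr.1 with | none => 0 | some l => l
  let right1 : Int := match lr.2 with | none => global_max | some r => r
  let left : Int := if left1 ≠ 0 then left1 - (current_numeric - left1) * expand_factor else 0
  let right : Int := if right1 ≠ global_max then right1 + (right1 - current_numeric) * expand_factor else global_max
  let candidates := unique_enums.filter (fun e => decide (left < enum_map.getD e 0) && decide (enum_map.getD e 0 < right))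
  if candidates = [] then unique_enums else candidates

def get_bounded_space (current_best : List String) (independent_set : List (List String)) (other_samples : List (List String)) (expand_factor : Int) : List (List String) :=
  (PySem.List.enumerate (current_best.zip independent_set) 0).foldl
    (fun bs p => bs ++ [aBody other_samples expand_factor p]) []

-- ===== PORT B =====

-- one sample's update of (below, above) in B's single scan
def bStep (cur : Int) (ba : Option Int × Option Int) (i : Int) : Option Int × Option Int :=
  if i < cur ∧ ba.1.all (fun b => decide (b < i)) then (some i, ba.2)
  else if cur < i ∧ ba.2.all (fun a => decide (i < a)) then (ba.1, some i)
  else ba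

-- B's "for s in other_samples" scan: enum_map.get(s[p_idx]), skip on None, else update
def bScan (enum_map : PySem.Dict String Int) (cur : Int) (p_idx : Int) (other_samples : List (List String)) : Option Int × Option Int :=
  other_samples.foldl (fun ba s =>
    match (PySem.List.pyGet? s p_idx).bind enum_map.get? with
    | none => ba
    | some i => bStep cur ba i) (none, none)

def bBody (other_samples : List (List String)) (expand_factor : Int) (p : Int × String × List String) : List String :=
  let unique_enums := PySem.List.dedup p.2.2
  let enum_map := (PySem.List.enumerate unique_enums 0).foldl (fun d q => d.insert q.2 q.1) PySem.Dict.empty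
  -- enum_map[current_best[p_idx]]: KeyError when absent is excluded by Pre_
  let cur := enum_map.getD p.2.1 0
  let n_max : Int := (unique_enums.length : Int) - 1
  let ba := bScan enum_map cur p.1 other_samples
  let left : Int := match ba.1 with | none => 0 | some b => if b = 0 then 0 else b - (cur - b) * expand_factor
  let right : Int := match ba.2 with | none => n_max | some a => if a = n_max then n_max else a + (a - cur) * expand_factor
  let candidates := (PySem.List.enumerate unique_enums 0).filterMap
    (fun q => if left < q.1 ∧ q.1 < right then some q.2 else none)
  if candidates = [] then unique_enums else candidates

def get_bounded_space_alt (current_best : List String) (independent_set : List (List String)) (other_samples : List (List String)) (expand_factor : Int) : List (List String) :=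
  (PySem.List.enumerate (current_best.zip independent_set) 0).foldl
    (fun bs p => bs ++ [bBody other_samples expand_factor p]) []

-- ===== PRECONDITION & SPEC =====
-- Pre_ excludes exactly the inputs where Python A raises: a KeyError when some zipped
-- current_best value is not among its parameter's values, and an IndexError when some
-- other_sample is shorter than the number of zipped parameters. B raises there too.
def Pre_get_bounded_space (current_best : List String) (independent_set : List (List String)) (other_samples : List (List String)) (expand_factor : Int) : Prop :=
  (∀ p ∈ current_best.zip independent_set, p.1 ∈ p.2) ∧
  (∀ s ∈ other_samples, min current_best.length independent_set.length ≤ s.length)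
instance (current_best : List String) (independent_set : List (List String)) (other_samples : List (List String)) (expand_factor : Int) : Decidable (Pre_get_bounded_space current_best independent_set other_samples expand_factor) := by unfold Pre_get_bounded_space; infer_instance

def pvWitness_get_bounded_space : List String × List (List String) × List (List String) × Int :=
  (["a"], [["a", "b", "c"]], [["c"], ["b"]], 1)

def Spec_get_bounded_space (current_best : List String) (independent_set : List (List String)) (other_samples : List (List String)) (expand_factor : Int) (out : List (List String)) : Prop := out = get_bounded_space_alt current_best independent_set other_samples expand_factor
instance (current_best : List String) (independent_set : List (List String)) (other_samples : List (List String)) (expand_factor : Int) (out : List (List String)) : Decidable (Spec_get_bounded_space current_best independent_set other_samples expand_factor out) := by unfold Spec_get_bounded_space; infer_instance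

-- ===== CLAIM (what is proved, stated in full; the proofs are below) =====
def Claim_equal_get_bounded_space : Prop := ∀ (current_best : List String) (independent_set : List (List String)) (other_samples : List (List String)) (expand_factor : Int), Dom_get_bounded_space current_best independent_set other_samples expand_factor → Pre_get_bounded_space current_best independent_set other_samples expand_factor → Spec_get_bounded_space current_best independent_set other_samples expand_factor (get_bounded_space current_best independent_set other_samples expand_factor)

-- ===== LEMMAS AND PROOFS =====

-- B's skipping scan is a fold over the filterMap of the mapped lookups
theorem bScan_eq (enum_map : PySem.Dict String Int) (cur : Int) (p_idx : Int)
    (other_samples : List (List String)) :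
    bScan enum_map cur p_idx other_samples
      = (other_samples.filterMap
          (fun s => (PySem.List.pyGet? s p_idx).bind enum_map.get?)).foldl
          (bStep cur) (none, none) := by
  unfold bScan
  have h : ∀ (l : List (List String)) (st : Option Int × Option Int),
      l.foldl (fun ba s =>
        match (PySem.List.pyGet? s p_idx).bind enum_map.get? with
        | none => ba
        | some i => bStep cur ba i) st
        = (l.filterMap
            (fun s => (PySem.List.pyGet? s p_idx).bind enum_map.get?)).foldl
            (bStep cur) st := by
    intro l
    induction l with
    | nil => intro st; rfl
    | cons s t ih =>
      intro st
      simp only [List.foldl_cons, List.filterMap_cons]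
      cases h : (PySem.List.pyGet? s p_idx).bind enum_map.get? <;> simp [ih]
  exact h other_samples (none, none)

-- A's comprehension builds exactly the filterMap of the mapped lookups
theorem aOtherNumerics_eq (enum_map : PySem.Dict String Int) (p_idx : Int)
    (other_samples : List (List String)) :
    aOtherNumerics enum_map p_idx other_samples
      = other_samples.filterMap (fun s => (PySem.List.pyGet? s p_idx).bind enum_map.get?) := by
  unfold aOtherNumerics
  have h : ∀ (l : List (List String)) (acc : List Int),
      l.foldl (fun acc s =>
        match PySem.List.pyGet? s p_idx with
        | none => acc
        | some x =>
          match enum_map.get? x with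
          | some nv => acc ++ [nv]
          | none => acc) acc
        = acc ++ l.filterMap (fun s => (PySem.List.pyGet? s p_idx).bind enum_map.get?) := by
    intro l
    induction l with
    | nil => intro acc; simp
    | cons s t ih =>
      intro acc
      simp only [List.foldl_cons, List.filterMap_cons]
      cases hx : PySem.List.pyGet? s p_idx with
      | none => simp [ih]
      | some x =>
        cases hv : enum_map.get? x with
        | none => simp [hv, ih]
        | some nv => simp [hv, ih]
  simpa using h other_samples []

-- A's two-if update equals B's if/elif update
theorem aStep_eq_bStep (cur : Int) : aStep cur = bStep cur := by
  funext ba i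
  obtain ⟨b, a⟩ := ba
  cases b <;> cases a <;>
    simp [aStep, bStep, aStepL, aStepR] <;> split_ifs <;> simp_all <;> omega

theorem aStepL_comm (cur : Int) (l : Option Int) (v w : Int) :
    aStepL cur (aStepL cur l v) w = aStepL cur (aStepL cur l w) v := by
  cases l <;> simp only [aStepL] <;> split_ifs <;>
    simp only [aStepL] <;> split_ifs <;> simp_all <;> omega

theorem aStepR_comm (cur : Int) (r : Option Int) (v w : Int) :
    aStepR cur (aStepR cur r v) w = aStepR cur (aStepR cur r w) v := by
  cases r <;> simp only [aStepR] <;> split_ifs <;>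
    simp only [aStepR] <;> split_ifs <;> simp_all <;> omega

theorem aStep_rightComm (cur : Int) : RightCommutative (aStep cur) :=
  ⟨fun st v w => by simp [aStep, aStepL_comm, aStepR_comm]⟩

-- sorting before A's boundary loop does not change its result
theorem fold_sorted_eq (cur : Int) (l : List Int) (init : Option Int × Option Int) :
    (PySem.List.sorted l (fun v => v) false).foldl (aStep cur) init
      = l.foldl (aStep cur) init := by
  haveI := aStep_rightComm cur
  exact (PySem.List.sorted_perm l (fun v => v) false).foldl_eq init

-- a fresh-key insert loop leaves other keys' lookups unchanged
theorem getD_fold_not_mem (e : String) :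
    ∀ (l : List (Int × String)) (d : PySem.Dict String Int),
      (∀ q ∈ l, q.2 ≠ e) →
      (l.foldl (fun d q => d.insert q.2 q.1) d).getD e 0 = d.getD e 0 := by
  intro l
  induction l with
  | nil => intro d _; rfl
  | cons q t ih =>
    intro d h
    have hne : q.2 ≠ e := h q (by simp)
    have ht : ∀ r ∈ t, r.2 ≠ e := fun r hr => h r (by simp [hr])
    simp only [List.foldl_cons, ih _ ht,
      PySem.Dict.getD_insert d q.2 e q.1 0]
    simp [Ne.symm hne]

-- in the enumerate-built map of a duplicate-free list, each element looks up its position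
theorem lookup_enum :
    ∀ (u : List String) (s : Int) (d : PySem.Dict String Int), u.Nodup →
      ∀ q ∈ PySem.List.enumerate u s,
        ((PySem.List.enumerate u s).foldl (fun d q => d.insert q.2 q.1) d).getD q.2 0 = q.1 := by
  intro u
  induction u with
  | nil => intro s d _ q hq; simp [PySem.List.enumerate_nil] at hq
  | cons x xs ih =>
    intro s d hnd q hq
    rw [PySem.List.enumerate_cons] at hq ⊢
    have hx : x ∉ xs := (List.nodup_cons.mp hnd).1
    rcases List.mem_cons.mp hq with hq | hq
    · subst hq
      simp only [List.foldl_cons]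
      rw [getD_fold_not_mem x (PySem.List.enumerate xs (s + 1)) (d.insert x s)]
      · rw [PySem.Dict.getD_insert]
        simp
      · intro r hr
        rw [PySem.List.mem_enumerate_iff] at hr
        obtain ⟨k, hk, rfl⟩ := hr
        simp only [ne_eq]
        intro hcontra
        exact hx (hcontra ▸ List.getElem_mem hk)
    · simp only [List.foldl_cons]
      exact ih (s + 1) (d.insert x s) (List.nodup_cons.mp hnd).2 q hq

-- filtering a list by a position predicate equals the enumerate comprehension
theorem filter_eq_filterMap_enum (P : Int → Prop) [DecidablePred P] (g : String → Int) :
    ∀ (u : List String) (s : Int),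
      (∀ q ∈ PySem.List.enumerate u s, g q.2 = q.1) →
      u.filter (fun e => decide (P (g e)))
        = (PySem.List.enumerate u s).filterMap (fun q => if P q.1 then some q.2 else none) := by
  intro u
  induction u with
  | nil => intro s _; simp [PySem.List.enumerate_nil]
  | cons x xs ih =>
    intro s h
    rw [PySem.List.enumerate_cons]
    have hx : g x = s := by
      have := h (s, x) (by rw [PySem.List.enumerate_cons]; simp)
      simpa using this
    have hxs : ∀ q ∈ PySem.List.enumerate xs (s + 1), g q.2 = q.1 := by
      intro q hq
      exact h q (by rw [PySem.List.enumerate_cons]; simp [hq])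
    by_cases hp : P s
    · simp [List.filterMap_cons, hx, hp, ih (s + 1) hxs]
    · simp [List.filterMap_cons, hx, hp, ih (s + 1) hxs]

-- the two per-parameter bodies agree
theorem body_eq (other_samples : List (List String)) (expand_factor : Int)
    (p : Int × String × List String) :
    aBody other_samples expand_factor p = bBody other_samples expand_factor p := by
  simp only [aBody, bBody, enum_to_numeric]
  have hscan :
      (PySem.List.sorted
          (aOtherNumerics
            ((PySem.List.enumerate (PySem.List.dedup p.2.2) 0).foldl
              (fun d q => d.insert q.2 q.1) PySem.Dict.empty) p.1 other_samples)
          (fun v => v) false).foldl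
        (aStep (((PySem.List.enumerate (PySem.List.dedup p.2.2) 0).foldl
              (fun d q => d.insert q.2 q.1) PySem.Dict.empty).getD p.2.1 0)) (none, none)
      = bScan
          ((PySem.List.enumerate (PySem.List.dedup p.2.2) 0).foldl
            (fun d q => d.insert q.2 q.1) PySem.Dict.empty)
          (((PySem.List.enumerate (PySem.List.dedup p.2.2) 0).foldl
            (fun d q => d.insert q.2 q.1) PySem.Dict.empty).getD p.2.1 0)
          p.1 other_samples := by
    rw [fold_sorted_eq, aOtherNumerics_eq, aStep_eq_bStep, bScan_eq]
  rw [hscan]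
  set emap := (PySem.List.enumerate (PySem.List.dedup p.2.2) 0).foldl
      (fun d q => d.insert q.2 q.1) PySem.Dict.empty with hemap
  set uniq := PySem.List.dedup p.2.2 with huniq
  set cur := emap.getD p.2.1 0 with hcur
  obtain ⟨b, a⟩ := bScan emap cur p.1 other_samples
  have hlookup : ∀ q ∈ PySem.List.enumerate uniq 0, emap.getD q.2 0 = q.1 := by
    intro q hq
    exact lookup_enum uniq 0 PySem.Dict.empty (PySem.List.nodup_dedup p.2.2) q hq
  have hleft : ∀ (L R : Int),
      uniq.filter (fun e => decide (L < emap.getD e 0) && decide (emap.getD e 0 < R))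
        = (PySem.List.enumerate uniq 0).filterMap
            (fun q => if L < q.1 ∧ q.1 < R then some q.2 else none) := by
    intro L R
    have := filter_eq_filterMap_enum (fun k => L < k ∧ k < R) (fun e => emap.getD e 0)
      uniq 0 hlookup
    simpa [Bool.decide_and] using this
  clear hemap huniq hcur
  cases b <;> cases a <;>
    simp only [ne_eq, ite_not, reduceIte] <;> rw [hleft]

-- ===== VERDICT (by name: the statement is the Claim_ definition above) =====
theorem get_bounded_space_spec : Claim_equal_get_bounded_space := by
  intro current_best independent_set other_samples expand_factor _ _
  show get_bounded_space _ _ _ _ = get_bounded_space_alt _ _ _ _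
  simp only [get_bounded_space, get_bounded_space_alt, body_eq]
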